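-- pv_equiv track=rewrite | github.com/ashirviskas/albion-online-stats | application/src/stats/item_price.py | format_req
-- ===== SOURCE A (Python) =====
-- DATA_URL = 'https://www.albion-online-data.com/api/v2/stats/prices/'
--
-- def format_req(item, locations=None, qualities=None):
--     req_str = DATA_URL + item
--     if locations is not None:
--         req_str += '?locations=' + ','.join(locations)
--         if qualities is not None:
--             req_str = req_str + '&qualities=' + ','.join(str(q) for q in qualities)
--     elif qualities is not None:
--         req_str = req_str + '?qualities=' + ','.join(str(q) for q in qualities)
--     return req_str
-- ===== SOURCE B (Python) =====
-- DATA_URL = 'https://www.albion-online-data.com/api/v2/stats/prices/'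
--
-- def format_req(item, locations=None, qualities=None):
--     params = []
--     if locations is not None:
--         params.append('locations=' + ','.join(locations))
--     if qualities is not None:
--         params.append('qualities=' + ','.join(str(q) for q in qualities))
--     req_str = DATA_URL + item
--     if params:
--         req_str += '?' + '&'.join(params)
--     return req_str
-- ===== Notes on version B (the rewrite author's own statement) =====
-- stated objective: simpler
-- what changed: Replaces A's nested if/elif separator logic with a uniform scheme: collect the query segments in a list, then once at the end prefix a question mark and join the segments with ampersands.
import Mathlib
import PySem

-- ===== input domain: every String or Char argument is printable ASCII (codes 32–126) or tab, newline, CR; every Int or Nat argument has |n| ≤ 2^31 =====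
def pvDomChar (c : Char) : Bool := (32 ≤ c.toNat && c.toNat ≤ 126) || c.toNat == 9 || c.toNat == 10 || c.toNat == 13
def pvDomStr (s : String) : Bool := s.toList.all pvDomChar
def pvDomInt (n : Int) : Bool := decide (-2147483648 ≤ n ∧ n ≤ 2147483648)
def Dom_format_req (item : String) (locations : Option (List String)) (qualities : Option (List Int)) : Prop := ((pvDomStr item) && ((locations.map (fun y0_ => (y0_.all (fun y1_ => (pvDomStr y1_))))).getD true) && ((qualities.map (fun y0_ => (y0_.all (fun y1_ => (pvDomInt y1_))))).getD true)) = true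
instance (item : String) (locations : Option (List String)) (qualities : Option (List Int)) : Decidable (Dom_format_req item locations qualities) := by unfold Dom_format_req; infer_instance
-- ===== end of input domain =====

-- B replaces A's nested if/elif separator logic with a params-list + join-once scheme (objective: simpler); same return value on all inputs.

-- ===== PORT A =====
def pvDATA_URL : String := "https://www.albion-online-data.com/api/v2/stats/prices/"

def format_req (item : String) (locations : Option (List String)) (qualities : Option (List Int)) : String :=
  let req_str := pvDATA_URL ++ item
  match locations with
  | some ls =>
    let req_str := req_str ++ ("?locations=" ++ PySem.Str.join "," ls)
    match qualities with
    | some qs => req_str ++ "&qualities=" ++ PySem.Str.join "," (qs.map PySem.Int.toStr)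
    | none => req_str
  | none =>
    match qualities with
    | some qs => req_str ++ "?qualities=" ++ PySem.Str.join "," (qs.map PySem.Int.toStr)
    | none => req_str

-- ===== PORT B =====
def format_req_alt (item : String) (locations : Option (List String)) (qualities : Option (List Int)) : String :=
  let params : List String := []
  let params := match locations with
    | some ls => params ++ ["locations=" ++ PySem.Str.join "," ls]
    | none => params
  let params := match qualities with
    | some qs => params ++ ["qualities=" ++ PySem.Str.join "," (qs.map PySem.Int.toStr)]
    | none => params
  let req_str := pvDATA_URL ++ item
  if params.isEmpty then req_str else req_str ++ ("?" ++ PySem.Str.join "&" params)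

-- ===== PRECONDITION & SPEC =====
def Spec_format_req (item : String) (locations : Option (List String)) (qualities : Option (List Int)) (out : String) : Prop := out = format_req_alt item locations qualities
instance (item : String) (locations : Option (List String)) (qualities : Option (List Int)) (out : String) : Decidable (Spec_format_req item locations qualities out) := by unfold Spec_format_req; infer_instance

-- ===== CLAIM (what is proved, stated in full; the proofs are below) =====
def Claim_equal_format_req : Prop := ∀ (item : String) (locations : Option (List String)) (qualities : Option (List Int)), Dom_format_req item locations qualities → Spec_format_req item locations qualities (format_req item locations qualities)

-- ===== LEMMAS AND PROOFS =====

-- ===== VERDICT (by name: the statement is the Claim_ definition above) =====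
theorem format_req_spec : Claim_equal_format_req := by
  intro item locations qualities _
  unfold Spec_format_req format_req format_req_alt
  cases locations <;> cases qualities <;>
    (apply String.toList_injective;
     simp [PySem.Str.join, PySem.Chars.join_cons_cons, PySem.Chars.join_singleton,
           PySem.Chars.join_nil])
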